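-- pv_equiv track=rewrite | github.com/Sumit2424/pythontask | backend/nlp/pipeline.py | split_multi_tasks
-- ===== SOURCE A (Python) =====
-- TASK_VERBS = [
--     "fix", "update", "design", "write", "optimize",
--     "improve", "build", "implement", "create",
--     "develop", "deploy", "refactor", "patch"
-- ]
--
-- def split_multi_tasks(sentence: str):
--     """
--     Split a multi-task sentence into smaller actionable fragments.
--     This fixes the issue where capital letters (e.g., 'and Mohit')
--     prevented the split from happening.
--     """
--
--     # Create lowercase matching copy — DO NOT modify original sentence.
--     temp = sentence.lower()
--
--     # Insert split markers before verbs to break multi-action sequences.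
--     for verb in TASK_VERBS:
--         temp = temp.replace(f" and {verb}", f" || {verb}")
--
--     # Now split using the inserted markers.
--     temp_parts = [p.strip() for p in temp.split("||") if p.strip()]
--
--     # Rebuild original case fragments by aligning temp chunks back to the original sentence.
--     fragments = []
--     start_index = 0
--     original_lower = sentence.lower()
--
--     for part in temp_parts:
--         idx = original_lower.find(part, start_index)
--         if idx != -1:
--             fragments.append(sentence[idx:idx + len(part)])
--             start_index = idx + len(part)
--         else:
--             # Fallback: use lowercase part if exact match fails
--             fragments.append(part)
--
--     return fragments
-- ===== SOURCE B (Python) =====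
-- TASK_VERBS = [
--     "fix", "update", "design", "write", "optimize",
--     "improve", "build", "implement", "create",
--     "develop", "deploy", "refactor", "patch"
-- ]
--
-- def split_multi_tasks(sentence: str):
--     """Cut the sentence directly at case-insensitive ' and <verb>' boundaries,
--     keeping each fragment in its original case."""
--     low = sentence.lower()
--     pieces = []
--     buf = []
--     i = 0
--     n = len(sentence)
--     while i < n:
--         if low.startswith(" and ", i) and any(low.startswith(v, i + 5) for v in TASK_VERBS):
--             pieces.append("".join(buf))
--             buf = []
--             i += 5
--         else:
--             buf.append(sentence[i])
--             i += 1
--     pieces.append("".join(buf))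
--     return [p.strip() for p in pieces if p.strip()]
-- ===== Notes on version B (the rewrite author's own statement) =====
-- stated objective: simpler
-- what changed: Replaces A's four-stage pipeline (lowercase copy, 13 sequential .replace passes inserting marker text, split on the marker, then a find()-based realignment loop mapping lowercase parts back to original-case slices) with a single left-to-right scan of the original sentence that cuts directly at case-insensitive and+task-verb boundaries, so fragments are already in original case and no marker string or realignment pass exists.
-- intended difference: On sentences that already contain the substring '||', A splits at those characters too (they collide with A's internal marker string, e.g. A('a||b') = ['a','b']), while B returns the fragments with the '||' text kept intact (['a||b']), which is the intended behaviour since '||' in the input is ordinary text, not a task boundary. — e.g. on split_multi_tasks("a||b"): A returns ["a", "b"], B returns ["a||b"]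
import Mathlib
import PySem

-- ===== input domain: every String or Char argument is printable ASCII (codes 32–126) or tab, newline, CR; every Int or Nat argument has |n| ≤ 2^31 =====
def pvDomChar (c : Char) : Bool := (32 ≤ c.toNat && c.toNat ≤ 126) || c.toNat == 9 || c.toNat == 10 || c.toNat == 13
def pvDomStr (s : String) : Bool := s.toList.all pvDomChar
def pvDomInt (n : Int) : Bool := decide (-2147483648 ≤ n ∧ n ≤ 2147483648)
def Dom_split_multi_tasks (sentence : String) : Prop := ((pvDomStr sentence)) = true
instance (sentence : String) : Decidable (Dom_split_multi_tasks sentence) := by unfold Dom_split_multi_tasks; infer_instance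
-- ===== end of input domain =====

-- B replaces A's replace/split/find pipeline by one case-insensitive scan that cuts the
-- original sentence directly at and+task-verb boundaries; on sentences containing "||" (A's
-- internal marker, where A accidentally also splits) B keeps the text intact (see D_ below).


-- ===== PORT A =====
def pyVerbs : List (List Char) :=
  [['f','i','x'], ['u','p','d','a','t','e'], ['d','e','s','i','g','n'], ['w','r','i','t','e'],
   ['o','p','t','i','m','i','z','e'], ['i','m','p','r','o','v','e'], ['b','u','i','l','d'],
   ['i','m','p','l','e','m','e','n','t'], ['c','r','e','a','t','e'], ['d','e','v','e','l','o','p'],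
   ['d','e','p','l','o','y'], ['r','e','f','a','c','t','o','r'], ['p','a','t','c','h']]

def split_multi_tasks (sentence : String) : List String :=
  let cs := sentence.toList
  let temp0 := PySem.Chars.lower cs
  let temp := pyVerbs.foldl (fun t verb =>
      PySem.Chars.replace t ([' ','a','n','d',' '] ++ verb) ([' ','|','|',' '] ++ verb)) temp0
  let temp_parts := ((PySem.Chars.splitOn temp ['|','|']).filter
      (fun p => PySem.Chars.strip p ≠ ([] : List Char))).map PySem.Chars.strip
  let ol := PySem.Chars.lower cs
  let r := temp_parts.foldl (fun (st : List (List Char) × Int) part =>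
      let idx := PySem.Chars.findFrom ol part st.2
      if idx ≠ -1 then
        (st.1 ++ [PySem.Chars.slice cs (some idx) (some (idx + part.length))], idx + part.length)
      else (st.1 ++ [part], st.2)) (([], 0) : List (List Char) × Int)
  r.1.map String.ofList

-- ===== PORT B =====
-- Source B's test: low.startswith(" and ", i) and any(low.startswith(v, i+5) for v in TASK_VERBS)
def altIsMarker (rest : List Char) : Bool :=
  PySem.Chars.startswith (PySem.Chars.lower rest) [' ','a','n','d',' '] &&
  pyVerbs.any (fun v => PySem.Chars.startswith ((PySem.Chars.lower rest).drop 5) v)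

-- Source B's while-loop over the sentence (fuel = remaining length, as in the Python index bound)
def altScan : Nat → List Char → List Char → List (List Char)
  | 0, rest, buf => [buf ++ rest]
  | _ + 1, [], buf => [buf]
  | fuel + 1, c :: rs, buf =>
    if altIsMarker (c :: rs) then buf :: altScan fuel ((c :: rs).drop 5) []
    else altScan fuel rs (buf ++ [c])

def split_multi_tasks_alt (sentence : String) : List String :=
  ((altScan sentence.toList.length sentence.toList []).filter
      (fun p => PySem.Chars.strip p ≠ ([] : List Char))).map
    (fun p => String.ofList (PySem.Chars.strip p))

-- ===== PRECONDITION & SPEC =====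
-- On sentences that already contain "||", A splits at those characters too (they collide with
-- A's internal marker string, e.g. A "a||b" = ["a","b"]); B keeps the "||" text intact
-- (["a||b"]), the intended behaviour: "||" in the input is ordinary text, not a task boundary.
def D_split_multi_tasks (sentence : String) : Prop :=
  PySem.Str.isIn "||" sentence = true
instance (sentence : String) : Decidable (D_split_multi_tasks sentence) := by
  unfold D_split_multi_tasks; infer_instance

def Spec_split_multi_tasks (sentence : String) (out : List String) : Prop :=
  ¬ D_split_multi_tasks sentence → out = split_multi_tasks_alt sentence
instance (sentence : String) (out : List String) : Decidable (Spec_split_multi_tasks sentence out) := by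
  unfold Spec_split_multi_tasks; infer_instance

def pvDiffWitness_split_multi_tasks : String := "a||b"
def pvDiffWitnessOut_split_multi_tasks : (List String) × (List String) := (["a", "b"], ["a||b"])

-- ===== CLAIM (what is proved, stated in full; the proofs are below) =====
def Claim_unchanged_split_multi_tasks : Prop := ∀ (sentence : String), Dom_split_multi_tasks sentence → Spec_split_multi_tasks sentence (split_multi_tasks sentence)
def Claim_changed_split_multi_tasks : Prop := Dom_split_multi_tasks (pvDiffWitness_split_multi_tasks) ∧ D_split_multi_tasks (pvDiffWitness_split_multi_tasks) ∧ split_multi_tasks (pvDiffWitness_split_multi_tasks) = pvDiffWitnessOut_split_multi_tasks.1 ∧ split_multi_tasks_alt (pvDiffWitness_split_multi_tasks) = pvDiffWitnessOut_split_multi_tasks.2 ∧ pvDiffWitnessOut_split_multi_tasks.1 ≠ pvDiffWitnessOut_split_multi_tasks.2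

-- ===== LEMMAS AND PROOFS =====

-- ---- abbreviations (proof side only) ----
def AND5 : List Char := [' ','a','n','d',' ']
def SEPM : List Char := [' ','|','|',' ']
def PP : List Char := ['|','|']

-- ---- verb-table facts ----
set_option maxRecDepth 4000 in
lemma verbs_ne : ∀ v ∈ pyVerbs, v ≠ [] ∧ 2 ≤ v.length := by decide
lemma verbs_chars_b : (pyVerbs.all (fun v => v.all (fun c =>
    (!PySem.Chars.isspace c) && c != '|' && c != ' '))) = true := by rfl
lemma verbs_chars : ∀ v ∈ pyVerbs, ∀ c ∈ v,
    PySem.Chars.isspace c = false ∧ c ≠ '|' ∧ c ≠ ' ' := by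
  have h := verbs_chars_b
  simp only [List.all_eq_true, Bool.and_eq_true, Bool.not_eq_true', bne_iff_ne] at h
  intro v hv c hc
  exact ⟨(h v hv c hc).1.1, (h v hv c hc).1.2, (h v hv c hc).2⟩
set_option maxRecDepth 4000 in
lemma verbs_nonprefix : ∀ v ∈ pyVerbs, ∀ w ∈ pyVerbs, v ≠ w → v.isPrefixOf w = false := by decide
set_option maxRecDepth 4000 in
lemma verbs_head : ∀ v ∈ pyVerbs, v[0]? ≠ some 'a' ∧ v[0]? ≠ some 'n' ∧
    (v[0]? = some 'd' → v[1]? = some 'e') := by decide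

-- ---- character facts ----
lemma lowerChar_bounds {c : Char} (h : PySem.Chars.isupper c = true) :
    97 ≤ (PySem.Chars.lowerChar c).toNat ∧ (PySem.Chars.lowerChar c).toNat ≤ 122 := by
  unfold PySem.Chars.isupper at h
  simp at h
  obtain ⟨h1, h2⟩ := h
  have hA : 65 ≤ c.toNat := h1
  have hZ : c.toNat ≤ 90 := h2
  unfold PySem.Chars.lowerChar
  rw [if_pos]
  · have hv : (c.toNat + 32).isValidChar := by
      left; omega
    rw [Char.toNat_ofNat, if_pos hv]; omega
  · unfold PySem.Chars.isupper; simp; exact ⟨h1, h2⟩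

lemma isspace_lowerChar (c : Char) :
    PySem.Chars.isspace (PySem.Chars.lowerChar c) = PySem.Chars.isspace c := by
  by_cases h : PySem.Chars.isupper c = true
  · obtain ⟨h1, h2⟩ := lowerChar_bounds h
    have hc : 65 ≤ c.toNat ∧ c.toNat ≤ 90 := by
      unfold PySem.Chars.isupper at h; simp at h; exact ⟨h.1, h.2⟩
    unfold PySem.Chars.isspace
    simp only []
    have : ∀ n : Nat, 65 ≤ n → n ≤ 122 →
        ((decide (n = 32) || decide (9 ≤ n) && decide (n ≤ 13) || decide (28 ≤ n) && decide (n ≤ 31) ||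
          decide (n = 133) || decide (n = 160) || decide (n = 5760) ||
          decide (8192 ≤ n) && decide (n ≤ 8202) || decide (n = 8232) || decide (n = 8233) ||
          decide (n = 8239) || decide (n = 8287) || decide (n = 12288)) = false) := by
      intro n hn1 hn2; simp; omega
    rw [this _ (by omega) h2, this _ hc.1 (by omega)]
  · unfold PySem.Chars.lowerChar
    rw [if_neg h]

lemma lowerChar_ne_bar {c : Char} (h : c ≠ '|') : PySem.Chars.lowerChar c ≠ '|' := by
  by_cases hu : PySem.Chars.isupper c = true
  · obtain ⟨h1, h2⟩ := lowerChar_bounds hu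
    intro he
    rw [he] at h2
    simp at h2
  · unfold PySem.Chars.lowerChar
    rw [if_neg hu]
    exact h

-- ---- the literal marker tests on the lowercase string ----
def mtest (t : List Char) : Bool :=
  AND5.isPrefixOf t && pyVerbs.any (fun v => v.isPrefixOf (t.drop 5))
def restr (ws : List (List Char)) (t : List Char) : Bool :=
  AND5.isPrefixOf t && ws.any (fun v => v.isPrefixOf (t.drop 5))

lemma restr_pyVerbs (t : List Char) : restr pyVerbs t = mtest t := rfl

lemma mtest_length {t : List Char} (h : mtest t = true) : 5 ≤ t.length := by
  unfold mtest at h; simp at h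
  have := h.1.length_le; simpa [AND5] using this

lemma restr_length {ws} {t : List Char} (h : restr ws t = true) : 5 ≤ t.length := by
  unfold restr at h; simp at h
  have := h.1.length_le; simpa [AND5] using this

-- ---- the mixed scan: markers with verb in ws already rewritten to " || ", others kept ----
def scanMix (ws : List (List Char)) (t : List Char) : List Char :=
  if h1 : restr ws t then SEPM ++ scanMix ws (t.drop 5)
  else if h2 : mtest t then AND5 ++ scanMix ws (t.drop 5)
  else match t with
  | [] => []
  | c :: r => c :: scanMix ws r
termination_by t.length
decreasing_by
  · have := restr_length h1; simp; omega
  · have := mtest_length h2; simp; omega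
  · simp

lemma scanMix_fire_r {ws t} (h : restr ws t = true) :
    scanMix ws t = SEPM ++ scanMix ws (t.drop 5) := by rw [scanMix]; simp [h]
lemma scanMix_fire_m {ws t} (h1 : restr ws t = false) (h2 : mtest t = true) :
    scanMix ws t = AND5 ++ scanMix ws (t.drop 5) := by rw [scanMix]; simp [h1, h2]
lemma scanMix_nil {ws} : scanMix ws [] = [] := by
  rw [scanMix]; simp [restr, mtest, AND5, List.isPrefixOf]
lemma restr_false_of_mtest {ws t} (hws : ∀ w ∈ ws, w ∈ pyVerbs) (h2 : mtest t = false) :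
    restr ws t = false := by
  unfold mtest at h2; unfold restr
  simp only [Bool.and_eq_false_iff] at h2 ⊢
  rcases h2 with h | h
  · exact Or.inl h
  · right
    simp only [List.any_eq_false] at h ⊢
    exact fun w hw => h w (hws w hw)
lemma scanMix_cons {ws c r} (hws : ∀ w ∈ ws, w ∈ pyVerbs) (h2 : mtest (c :: r) = false) :
    scanMix ws (c :: r) = c :: scanMix ws r := by
  rw [scanMix]; simp [restr_false_of_mtest hws h2, h2]

-- ---- structural model of PySem.Chars.replace (nonempty pattern) ----
def repFn (p q l : List Char) : List Char :=
  if h : p.isPrefixOf l ∧ p ≠ [] then q ++ repFn p q (l.drop p.length)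
  else match l with
  | [] => []
  | c :: r => c :: repFn p q r
termination_by l.length
decreasing_by
  · obtain ⟨h1, h2⟩ := h
    have h3 := List.isPrefixOf_iff_prefix.mp h1
    have := h3.length_le
    have hp : 0 < p.length := List.length_pos_iff.mpr h2
    have hl : l ≠ [] := by rintro rfl; exact h2 (List.prefix_nil.mp h3)
    have : 0 < l.length := List.length_pos_iff.mpr hl
    simp; omega
  · simp

lemma repFn_pos {p q l : List Char} (h : p.isPrefixOf l) (hp : p ≠ []) :
    repFn p q l = q ++ repFn p q (l.drop p.length) := by rw [repFn]; simp [h, hp]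
lemma repFn_nil {p q : List Char} : repFn p q [] = [] := by
  rw [repFn]; simp
lemma repFn_neg {p q : List Char} {c r} (h : p.isPrefixOf (c :: r) = false) :
    repFn p q (c :: r) = c :: repFn p q r := by rw [repFn]; simp [h]

lemma replace_go_eq (p q : List Char) (hp : p ≠ []) :
    ∀ (fuel : Nat) (l acc : List Char), l.length ≤ fuel →
    PySem.Chars.replace.go p q fuel l acc = acc.reverse ++ repFn p q l := by
  intro fuel
  induction fuel with
  | zero =>
    intro l acc hl
    have hln : l = [] := by
      cases l with
      | nil => rfl
      | cons c t => simp at hl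
    subst hln
    rw [repFn_nil]
    simp [PySem.Chars.replace.go]
  | succ n ih =>
    intro l acc hl
    cases l with
    | nil =>
      rw [repFn_nil]
      simp [PySem.Chars.replace.go]
    | cons c t =>
      by_cases hpre : p.isPrefixOf (c :: t) = true
      · have hplen : 1 ≤ p.length := by
          cases p with
          | nil => exact absurd rfl hp
          | cons a b => simp
        have hdl : ((c :: t).drop p.length).length ≤ n := by
          simp at hl ⊢; omega
        have hgo : PySem.Chars.replace.go p q (n+1) (c :: t) acc =
            PySem.Chars.replace.go p q n ((c :: t).drop p.length) (q.reverse ++ acc) := by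
          conv_lhs => rw [PySem.Chars.replace.go]
          simp [hpre]
        rw [hgo, ih _ _ hdl, repFn_pos hpre hp]
        simp
      · have hdl : t.length ≤ n := by simp at hl; omega
        have hgo : PySem.Chars.replace.go p q (n+1) (c :: t) acc =
            PySem.Chars.replace.go p q n t (c :: acc) := by
          conv_lhs => rw [PySem.Chars.replace.go]
          simp [hpre]
        rw [hgo, ih _ _ hdl, repFn_neg (Bool.eq_false_iff.mpr hpre)]
        simp

lemma replace_eq_repFn (p q l : List Char) (hp : p ≠ []) :
    PySem.Chars.replace l p q = repFn p q l := by
  unfold PySem.Chars.replace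
  rw [if_neg (by simpa [List.isEmpty_iff] using hp)]
  rw [replace_go_eq p q hp l.length l [] le_rfl]
  simp

lemma repFn_append {p q : List Char} (hp : p ≠ []) :
    ∀ {x y : List Char}, (∀ m, m < x.length → p.isPrefixOf ((x ++ y).drop m) = false) →
    repFn p q (x ++ y) = x ++ repFn p q y := by
  intro x
  induction x with
  | nil => intro y _; simp
  | cons c x' ih =>
    intro y h
    have h0 : p.isPrefixOf (c :: (x' ++ y)) = false := by simpa using h 0 (by simp)
    rw [List.cons_append, repFn_neg h0, ih]
    · simp
    · intro m hm
      simpa using h (m + 1) (by simp; omega)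

-- ---- structural model of PySem.Chars.splitOn (nonempty separator) ----
def splFn (sep l : List Char) : List (List Char) :=
  if h : sep.isPrefixOf l ∧ sep ≠ [] then [] :: splFn sep (l.drop sep.length)
  else match l with
  | [] => [[]]
  | c :: r => (splFn sep r).modifyHead (c :: ·)
termination_by l.length
decreasing_by
  · obtain ⟨h1, h2⟩ := h
    have h3 := List.isPrefixOf_iff_prefix.mp h1
    have := h3.length_le
    have hp : 0 < sep.length := List.length_pos_iff.mpr h2
    have hl : l ≠ [] := by rintro rfl; exact h2 (List.prefix_nil.mp h3)
    have : 0 < l.length := List.length_pos_iff.mpr hl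
    simp; omega
  · simp

lemma splFn_ne {sep l : List Char} : splFn sep l ≠ [] := by
  induction l using splFn.induct sep with
  | case1 l h ih => rw [splFn, dif_pos h]; simp
  | case2 h => rw [splFn, dif_neg h]; simp
  | case3 c r h ih =>
    rw [splFn, dif_neg h]
    simp only []
    cases h2 : splFn sep r with
    | nil => exact absurd h2 ih
    | cons a as => simp
lemma splFn_nil : splFn PP [] = [[]] := by rw [splFn]; simp [PP, List.isPrefixOf]
lemma splFn_cons {l : List Char} {c : Char} (h : PP.isPrefixOf (c :: l) = false) :
    splFn PP (c :: l) = (splFn PP l).modifyHead (c :: ·) := by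
  rw [splFn]; simp [h]
lemma splFn_sepm (X : List Char) :
    splFn PP (SEPM ++ X) = [' '] :: (splFn PP X).modifyHead (' ' :: ·) := by
  show splFn PP (' ' :: '|' :: '|' :: ' ' :: X) = _
  rw [splFn_cons (by simp [PP, List.isPrefixOf])]
  have hfire : splFn PP ('|' :: '|' :: ' ' :: X) = [] :: splFn PP (' ' :: X) := by
    rw [splFn, dif_pos ⟨by simp [PP, List.isPrefixOf], by simp [PP]⟩]
    rfl
  rw [hfire, splFn_cons (by simp [PP, List.isPrefixOf])]
  simp

lemma splitOn_go_eq (sep : List Char) (hs : sep ≠ []) :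
    ∀ (fuel : Nat) (l cur : List Char) (acc : List (List Char)), l.length < fuel →
    PySem.Chars.splitOn.go sep fuel l cur acc =
      acc.reverse ++ ((splFn sep l).modifyHead (cur.reverse ++ ·)) := by
  intro fuel
  induction fuel with
  | zero => intro l cur acc hl; omega
  | succ n ih =>
    intro l cur acc hl
    cases l with
    | nil =>
      have h0 : splFn sep [] = [[]] := by
        rw [splFn, dif_neg]
        rintro ⟨h1, h2⟩
        exact h2 (List.prefix_nil.mp (List.isPrefixOf_iff_prefix.mp h1))
      rw [h0]
      simp [PySem.Chars.splitOn.go]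
    | cons c t =>
      by_cases hpre : sep.isPrefixOf (c :: t) = true
      · have hplen : 1 ≤ sep.length := by
          cases sep with
          | nil => exact absurd rfl hs
          | cons a b => simp
        have hdl : ((c :: t).drop sep.length).length < n := by
          simp at hl ⊢; omega
        have hgo : PySem.Chars.splitOn.go sep (n+1) (c :: t) cur acc =
            PySem.Chars.splitOn.go sep n ((c :: t).drop sep.length) [] (cur.reverse :: acc) := by
          conv_lhs => rw [PySem.Chars.splitOn.go]
          simp [hpre]
        rw [hgo, ih _ _ _ hdl]
        have hstep : splFn sep (c :: t) = [] :: splFn sep ((c :: t).drop sep.length) := by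
          rw [splFn, dif_pos ⟨hpre, hs⟩]
        rw [hstep]
        cases hsp : splFn sep ((c :: t).drop sep.length) with
        | nil => exact absurd hsp splFn_ne
        | cons a as => simp
      · have hdl : t.length < n := by simp at hl; omega
        have hgo : PySem.Chars.splitOn.go sep (n+1) (c :: t) cur acc =
            PySem.Chars.splitOn.go sep n t (c :: cur) acc := by
          conv_lhs => rw [PySem.Chars.splitOn.go]
          simp [hpre]
        rw [hgo, ih _ _ _ hdl]
        have hstep : splFn sep (c :: t) = (splFn sep t).modifyHead (c :: ·) := by
          rw [splFn, dif_neg]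
          rintro ⟨h1, -⟩
          exact hpre h1
        rw [hstep]
        cases hsp : splFn sep t with
        | nil => exact absurd hsp splFn_ne
        | cons a as => simp

lemma splitOn_eq_splFn (sep l : List Char) (hs : sep ≠ []) :
    PySem.Chars.splitOn l sep = splFn sep l := by
  unfold PySem.Chars.splitOn
  rw [splitOn_go_eq sep hs (l.length + 1) l [] [] (by omega)]
  cases hsp : splFn sep l with
  | nil => exact absurd hsp splFn_ne
  | cons a as => simp

-- ---- basic marker-test helpers ----
lemma mtest_false_head {c : Char} (hc : c ≠ ' ') (l : List Char) : mtest (c :: l) = false := by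
  unfold mtest
  have : AND5.isPrefixOf (c :: l) = false := by
    simp [AND5, List.isPrefixOf]
    intro h; exact absurd h.symm hc
  simp [this]

lemma restr_append_one {ws v t} :
    restr (ws ++ [v]) t = (restr ws t || (AND5.isPrefixOf t && v.isPrefixOf (t.drop 5))) := by
  unfold restr
  rw [List.any_append]
  cases AND5.isPrefixOf t <;> simp

lemma mtest_of_pat_prefix {v t : List Char} (hv : v ∈ pyVerbs)
    (h : (AND5 ++ v) <+: t) : mtest t = true := by
  obtain ⟨z, hz⟩ := h
  rw [List.append_assoc] at hz
  subst hz
  unfold mtest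
  have h5 : (AND5 ++ (v ++ z)).drop 5 = v ++ z := by
    have : AND5.length = 5 := by simp [AND5]
    rw [← this, List.drop_left]
  rw [h5]
  simp only [Bool.and_eq_true, List.any_eq_true]
  refine ⟨List.isPrefixOf_iff_prefix.mpr (List.prefix_append _ _), v, hv, ?_⟩
  exact List.isPrefixOf_iff_prefix.mpr (List.prefix_append _ _)

lemma and5_decomp {t : List Char} (h : AND5.isPrefixOf t = true) :
    t = AND5 ++ t.drop 5 := by
  obtain ⟨z, hz⟩ := List.isPrefixOf_iff_prefix.mp h
  subst hz
  have hd : (AND5 ++ z).drop 5 = z := by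
    have h5 : AND5.length = 5 := by simp [AND5]
    rw [← h5, List.drop_left]
  rw [hd]

lemma verb_prefix_unique {v w : List Char} (hv : v ∈ pyVerbs) (hw : w ∈ pyVerbs)
    {z : List Char} (h : v <+: w ++ z) : v = w := by
  by_contra hne
  rcases le_or_gt v.length w.length with hle | hgt
  · have hvw : v <+: w := List.prefix_of_prefix_length_le h (List.prefix_append w z) hle
    have := verbs_nonprefix v hv w hw hne
    rw [List.isPrefixOf_iff_prefix.mpr hvw] at this
    simp at this
  · have hwv : w <+: v := List.prefix_of_prefix_length_le (List.prefix_append w z) h (by omega)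
    have := verbs_nonprefix w hw v hv (Ne.symm hne)
    rw [List.isPrefixOf_iff_prefix.mpr hwv] at this
    simp at this

-- ---- scanMix structure lemmas ----
lemma scanMix_empty (t : List Char) : scanMix [] t = t := by
  induction hn : t.length using Nat.strong_induction_on generalizing t with
  | _ n ih =>
  subst hn
  have hr : restr [] t = false := by unfold restr; simp
  by_cases hm : mtest t = true
  · have h5 := mtest_length hm
    have hdl : (t.drop 5).length < t.length := by simp; omega
    rw [scanMix_fire_m hr hm, ih _ hdl _ rfl]
    exact (and5_decomp (by unfold mtest at hm; simp at hm; exact List.isPrefixOf_iff_prefix.mpr hm.1)).symm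
  · cases t with
    | nil => exact scanMix_nil
    | cons c r =>
      rw [scanMix_cons (by simp) (Bool.eq_false_iff.mpr hm), ih r.length (by simp) r rfl]

lemma scanMix_verbatim {ws : List (List Char)} (hws : ∀ w ∈ ws, w ∈ pyVerbs) :
    ∀ (v r : List Char), (∀ c ∈ v, c ≠ ' ') → scanMix ws (v ++ r) = v ++ scanMix ws r := by
  intro v
  induction v with
  | nil => intro r _; simp
  | cons c v' ih =>
    intro r hv
    have hm : mtest (c :: (v' ++ r)) = false := mtest_false_head (hv c (by simp)) _
    rw [List.cons_append, scanMix_cons hws hm, ih r (fun d hd => hv d (by simp [hd]))]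
    simp

lemma scan_no_new {ws : List (List Char)} (hws : ∀ w ∈ ws, w ∈ pyVerbs)
    (u : List Char) : ∀ σ : List Char, (∀ c ∈ σ, c ≠ '|') → σ <+: scanMix ws u → σ <+: u := by
  induction hn : u.length using Nat.strong_induction_on generalizing u with
  | _ n ihn =>
  subst hn
  have ih : ∀ u' : List Char, u'.length < u.length →
      ∀ σ : List Char, (∀ c ∈ σ, c ≠ '|') → σ <+: scanMix ws u' → σ <+: u' :=
    fun u' h => ihn u'.length h u' rfl
  intro σ hσ hpre
  by_cases hr : restr ws u = true
  · have h5 := restr_length hr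
    rw [scanMix_fire_r hr] at hpre
    have hu5 : AND5.isPrefixOf u = true := by
      unfold restr at hr; simp at hr; exact List.isPrefixOf_iff_prefix.mpr hr.1
    match σ, hpre with
    | [], _ => exact List.nil_prefix
    | [a], hpre =>
      have ha : a = ' ' := by simpa [SEPM, List.cons_prefix_cons] using hpre
      subst ha
      rw [and5_decomp hu5]
      simp [AND5, List.cons_prefix_cons]
    | a :: b :: σ', hpre =>
      have hab : a = ' ' ∧ b = '|' := by
        have h1 := List.cons_prefix_cons.mp hpre
        have h2 := List.cons_prefix_cons.mp h1.2
        exact ⟨h1.1, h2.1⟩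
      exact absurd hab.2 (hσ b (by simp))
  · by_cases hm : mtest u = true
    · have h5 := mtest_length hm
      have hdl : (u.drop 5).length < u.length := by simp; omega
      rw [scanMix_fire_m (Bool.eq_false_iff.mpr hr) hm] at hpre
      have hu5 : AND5.isPrefixOf u = true := by
        unfold mtest at hm; simp at hm; exact List.isPrefixOf_iff_prefix.mpr hm.1
      have hud := and5_decomp hu5
      match σ, hpre with
      | [], _ => exact List.nil_prefix
      | [a], hpre =>
        obtain ⟨h1, -⟩ := List.cons_prefix_cons.mp hpre
        subst h1
        rw [hud]; simp [AND5, List.cons_prefix_cons]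
      | [a,b], hpre =>
        obtain ⟨h1, h2⟩ := List.cons_prefix_cons.mp hpre
        obtain ⟨h3, -⟩ := List.cons_prefix_cons.mp h2
        subst h1; subst h3
        rw [hud]; simp [AND5, List.cons_prefix_cons]
      | [a,b,c], hpre =>
        obtain ⟨h1, h2⟩ := List.cons_prefix_cons.mp hpre
        obtain ⟨h3, h4⟩ := List.cons_prefix_cons.mp h2
        obtain ⟨h5', -⟩ := List.cons_prefix_cons.mp h4
        subst h1; subst h3; subst h5'
        rw [hud]; simp [AND5, List.cons_prefix_cons]
      | [a,b,c,d], hpre =>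
        obtain ⟨h1, h2⟩ := List.cons_prefix_cons.mp hpre
        obtain ⟨h3, h4⟩ := List.cons_prefix_cons.mp h2
        obtain ⟨h5', h6⟩ := List.cons_prefix_cons.mp h4
        obtain ⟨h7, -⟩ := List.cons_prefix_cons.mp h6
        subst h1; subst h3; subst h5'; subst h7
        rw [hud]; simp [AND5, List.cons_prefix_cons]
      | a :: b :: c :: d :: e :: σ', hpre =>
        obtain ⟨h1, h2⟩ := List.cons_prefix_cons.mp hpre
        obtain ⟨h3, h4⟩ := List.cons_prefix_cons.mp h2
        obtain ⟨h5', h6⟩ := List.cons_prefix_cons.mp h4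
        obtain ⟨h7, h8⟩ := List.cons_prefix_cons.mp h6
        obtain ⟨h9, h10⟩ := List.cons_prefix_cons.mp h8
        subst h1; subst h3; subst h5'; subst h7; subst h9
        have hrec : σ' <+: u.drop 5 :=
          ih (u.drop 5) hdl σ' (fun x hx => hσ x (by simp [hx])) h10
        rw [hud]
        show (AND5 ++ σ') <+: (AND5 ++ u.drop 5)
        exact (List.prefix_append_right_inj AND5).mpr hrec
    · cases u with
      | nil => rw [scanMix_nil] at hpre; simpa using hpre
      | cons c r =>
        rw [scanMix_cons hws (Bool.eq_false_iff.mpr hm)] at hpre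
        match σ, hpre with
        | [], _ => exact List.nil_prefix
        | a :: σ', hpre =>
          obtain ⟨h1, h2⟩ := List.cons_prefix_cons.mp hpre
          subst h1
          exact List.cons_prefix_cons.mpr
            ⟨rfl, ih r (by simp) σ' (fun x hx => hσ x (by simp [hx])) h2⟩

-- ---- helpers for prefix mismatch ----
lemma not_prefix_head {a b : Char} {l1 l2 : List Char} (h : a ≠ b) :
    (a :: l1).isPrefixOf (b :: l2) = false := by
  rw [Bool.eq_false_iff]
  intro hc
  exact h (List.cons_prefix_cons.mp (List.isPrefixOf_iff_prefix.mp hc)).1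

lemma not_prefix_second {a b c d : Char} {l1 l2 : List Char} (h : b ≠ d) :
    (a :: b :: l1).isPrefixOf (c :: d :: l2) = false := by
  rw [Bool.eq_false_iff]
  intro hc
  have h1 := List.cons_prefix_cons.mp (List.isPrefixOf_iff_prefix.mp hc)
  exact h (List.cons_prefix_cons.mp h1.2).1

lemma pat_ne {v : List Char} : (AND5 ++ v) ≠ [] := by simp [AND5]

lemma pat_barfree {v : List Char} (hv : v ∈ pyVerbs) : ∀ c ∈ AND5 ++ v, c ≠ '|' := by
  intro c hc
  rcases List.mem_append.mp hc with h | h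
  · fin_cases h <;> decide
  · exact (verbs_chars v hv c h).2.1

lemma verb_head_ne_space {w : List Char} (hw : w ∈ pyVerbs) {d : Char} {wt : List Char}
    (hd : w = d :: wt) : d ≠ ' ' := by
  have := verbs_chars w hw d (by simp [hd])
  exact this.2.2

lemma verb_head_ne_a {w : List Char} (hw : w ∈ pyVerbs) {d : Char} {wt : List Char}
    (hd : w = d :: wt) : d ≠ 'a' := by
  have := (verbs_head w hw).1
  intro hda
  rw [hd, hda] at this
  simp at this

-- ---- one replace pass advances the mixed scan by one verb ----
lemma step_pass {v : List Char} (hv : v ∈ pyVerbs) {ws : List (List Char)}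
    (hws : ∀ w ∈ ws, w ∈ pyVerbs) (t : List Char) :
    repFn (AND5 ++ v) (SEPM ++ v) (scanMix ws t) = scanMix (ws ++ [v]) t := by
  have hws' : ∀ w ∈ ws ++ [v], w ∈ pyVerbs := by
    intro w hw
    rcases List.mem_append.mp hw with h | h
    · exact hws w h
    · simp at h; subst h; exact hv
  have hvsp : ∀ c ∈ v, c ≠ ' ' := fun c hc => (verbs_chars v hv c hc).2.2
  induction hn : t.length using Nat.strong_induction_on generalizing t with
  | _ n ihn =>
  subst hn
  have ih : ∀ t' : List Char, t'.length < t.length →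
      repFn (AND5 ++ v) (SEPM ++ v) (scanMix ws t') = scanMix (ws ++ [v]) t' :=
    fun t' h => ihn t'.length h t' rfl
  by_cases hr : restr ws t = true
  · -- a marker already rewritten: " || " prefix, pattern cannot cross it
    have h5 := restr_length hr
    have hdl : (t.drop 5).length < t.length := by simp; omega
    obtain ⟨v', hv'w, hv'p⟩ : ∃ v' ∈ ws, v'.isPrefixOf (t.drop 5) = true := by
      unfold restr at hr; simp at hr
      obtain ⟨-, v', h1, h2⟩ := hr
      exact ⟨v', h1, List.isPrefixOf_iff_prefix.mpr h2⟩
    obtain ⟨d, v't, hdv⟩ : ∃ d v't, v' = d :: v't := by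
      cases v' with
      | nil => exact absurd rfl (verbs_ne [] (hws [] hv'w)).1
      | cons a b => exact ⟨a, b, rfl⟩
    obtain ⟨t5t, ht5⟩ : ∃ t5t, t.drop 5 = d :: t5t := by
      obtain ⟨z, hz⟩ := List.isPrefixOf_iff_prefix.mp hv'p
      rw [hdv] at hz
      exact ⟨v't ++ z, by rw [← hz]; simp⟩
    have hXc : scanMix ws (t.drop 5) = d :: scanMix ws t5t := by
      rw [ht5]
      exact scanMix_cons hws (mtest_false_head (verb_head_ne_space (hws v' hv'w) hdv) _)
    have hda : d ≠ 'a' := verb_head_ne_a (hws v' hv'w) hdv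
    rw [scanMix_fire_r hr]
    have happ : repFn (AND5 ++ v) (SEPM ++ v) (SEPM ++ scanMix ws (t.drop 5)) =
        SEPM ++ repFn (AND5 ++ v) (SEPM ++ v) (scanMix ws (t.drop 5)) := by
      apply repFn_append pat_ne
      intro m hm
      simp [SEPM] at hm
      have hsep : SEPM ++ scanMix ws (t.drop 5) =
          ' ' :: '|' :: '|' :: ' ' :: scanMix ws (t.drop 5) := rfl
      interval_cases m
      · rw [hsep]
        show (AND5 ++ v).isPrefixOf (' ' :: '|' :: '|' :: ' ' :: scanMix ws (t.drop 5)) = false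
        exact not_prefix_second (by decide)
      · rw [hsep]
        show (AND5 ++ v).isPrefixOf ('|' :: '|' :: ' ' :: scanMix ws (t.drop 5)) = false
        exact not_prefix_head (by decide)
      · rw [hsep]
        show (AND5 ++ v).isPrefixOf ('|' :: ' ' :: scanMix ws (t.drop 5)) = false
        exact not_prefix_head (by decide)
      · rw [hsep]
        show (AND5 ++ v).isPrefixOf (' ' :: scanMix ws (t.drop 5)) = false
        rw [hXc]
        exact not_prefix_second (Ne.symm hda)
    rw [happ, ih _ hdl]
    conv_rhs => rw [scanMix_fire_r (t := t) (by rw [restr_append_one, hr]; simp)]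
  · by_cases hm : mtest t = true
    · have h5 := mtest_length hm
      have hdl : (t.drop 5).length < t.length := by simp; omega
      have hu5 : AND5.isPrefixOf t = true := by
        unfold mtest at hm; simp at hm; exact List.isPrefixOf_iff_prefix.mpr hm.1
      have hud := and5_decomp hu5
      rw [scanMix_fire_m (Bool.eq_false_iff.mpr hr) hm]
      by_cases hvm : v.isPrefixOf (t.drop 5) = true
      · -- this marker's verb is v itself: the pass rewrites it
        obtain ⟨r, hrr⟩ := List.isPrefixOf_iff_prefix.mp hvm
        have hrl : r.length < t.length := by
          have : (t.drop 5).length = v.length + r.length := by rw [← hrr]; simp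
          simp at this ⊢
          have hvl := (verbs_ne v hv).2
          omega
        rw [← hrr, scanMix_verbatim hws v r hvsp]
        have hpos : (AND5 ++ v).isPrefixOf (AND5 ++ (v ++ scanMix ws r)) = true := by
          rw [← List.append_assoc]
          exact List.isPrefixOf_iff_prefix.mpr (List.prefix_append _ _)
        rw [repFn_pos hpos pat_ne]
        have hdrop : (AND5 ++ (v ++ scanMix ws r)).drop (AND5 ++ v).length = scanMix ws r := by
          rw [← List.append_assoc, List.drop_left]
        rw [hdrop, ih r hrl]
        have hr' : restr (ws ++ [v]) t = true := by
          rw [restr_append_one, hu5, hvm]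
          simp
        rw [scanMix_fire_r hr']
        rw [← hrr, scanMix_verbatim hws' v r hvsp]
        simp [SEPM]
      · -- the marker's verb w is a different verb: the pass walks across it
        obtain ⟨w, hww, hwp⟩ : ∃ w ∈ pyVerbs, w.isPrefixOf (t.drop 5) = true := by
          unfold mtest at hm; simp at hm
          obtain ⟨-, w, h1, h2⟩ := hm
          exact ⟨w, h1, List.isPrefixOf_iff_prefix.mpr h2⟩
        obtain ⟨rw', hrw⟩ := List.isPrefixOf_iff_prefix.mp hwp
        have hwsp : ∀ c ∈ w, c ≠ ' ' := fun c hc => (verbs_chars w hww c hc).2.2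
        have hrwl : rw'.length < t.length := by
          have : (t.drop 5).length = w.length + rw'.length := by rw [← hrw]; simp
          simp at this ⊢
          have hwl := (verbs_ne w hww).2
          omega
        obtain ⟨w0, wt, hw0⟩ : ∃ w0 wt, w = w0 :: wt := by
          cases w with
          | nil => exact absurd rfl (verbs_ne [] hww).1
          | cons a b => exact ⟨a, b, rfl⟩
        rw [← hrw, scanMix_verbatim hws w rw' hwsp]
        have happ : repFn (AND5 ++ v) (SEPM ++ v) (AND5 ++ (w ++ scanMix ws rw')) =
            (AND5 ++ w) ++ repFn (AND5 ++ v) (SEPM ++ v) (scanMix ws rw') := by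
          rw [← List.append_assoc]
          apply repFn_append pat_ne
          intro m hm'
          have hml : m < 5 + w.length := by
            have := hm'; simp [AND5] at this; omega
          have hassoc : (AND5 ++ w) ++ scanMix ws rw' = AND5 ++ (w ++ scanMix ws rw') := by
            rw [List.append_assoc]
          rcases Nat.lt_or_ge m 5 with hm5 | hm5
          · have hfull : AND5 ++ (w ++ scanMix ws rw') =
                ' ' :: 'a' :: 'n' :: 'd' :: ' ' :: (w ++ scanMix ws rw') := rfl
            interval_cases m
            · rw [Bool.eq_false_iff]
              intro hcon
              have hpre := List.isPrefixOf_iff_prefix.mp hcon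
              rw [List.drop_zero, hassoc, hfull] at hpre
              have hvpre : v <+: (w ++ scanMix ws rw') := by
                have := (List.prefix_append_right_inj AND5).mp (by exact hpre)
                exact this
              have hveq : v = w := verb_prefix_unique hv hww hvpre
              rw [hveq, ← hrw] at hvm
              exact hvm (List.isPrefixOf_iff_prefix.mpr (List.prefix_append _ _))
            · rw [hassoc, hfull]
              show (AND5 ++ v).isPrefixOf ('a' :: 'n' :: 'd' :: ' ' :: (w ++ scanMix ws rw')) = false
              exact not_prefix_head (by decide)
            · rw [hassoc, hfull]
              show (AND5 ++ v).isPrefixOf ('n' :: 'd' :: ' ' :: (w ++ scanMix ws rw')) = false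
              exact not_prefix_head (by decide)
            · rw [hassoc, hfull]
              show (AND5 ++ v).isPrefixOf ('d' :: ' ' :: (w ++ scanMix ws rw')) = false
              exact not_prefix_head (by decide)
            · rw [hassoc, hfull]
              show (AND5 ++ v).isPrefixOf (' ' :: (w ++ scanMix ws rw')) = false
              rw [hw0]
              show (AND5 ++ v).isPrefixOf (' ' :: w0 :: (wt ++ scanMix ws rw')) = false
              exact not_prefix_second (Ne.symm (verb_head_ne_a hww hw0))
          · obtain ⟨k, hk⟩ : ∃ k, m = 5 + k := ⟨m - 5, by omega⟩
            have hkw : k < w.length := by omega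
            rw [hassoc, hk]
            have hdrop5k : (AND5 ++ (w ++ scanMix ws rw')).drop (5 + k) =
                (w ++ scanMix ws rw').drop k := by
              rw [List.drop_append]
              have h1 : (AND5 : List Char).drop (5 + k) = [] :=
                List.drop_eq_nil_of_le (by simp [AND5])
              have h2 : 5 + k - (AND5 : List Char).length = k := by simp [AND5]
              rw [h1, h2]
              simp
            rw [hdrop5k]
            have hdropk : (w ++ scanMix ws rw').drop k = w[k] :: (w.drop (k+1) ++ scanMix ws rw') := by
              rw [List.drop_append_of_le_length (by omega)]
              exact congrArg (fun z => z ++ scanMix ws rw') (List.drop_eq_getElem_cons hkw)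
            rw [hdropk]
            exact not_prefix_head (Ne.symm ((verbs_chars w hww w[k] (w.getElem_mem hkw)).2.2))
        rw [happ, ih _ hrwl]
        have hr' : restr (ws ++ [v]) t = false := by
          rw [restr_append_one, Bool.eq_false_iff.mpr hr, Bool.eq_false_iff.mpr hvm]
          simp
        rw [scanMix_fire_m hr' hm, ← hrw, scanMix_verbatim hws' w rw' hwsp]
        simp
    · cases t with
      | nil =>
        rw [scanMix_nil, repFn_nil, scanMix_nil]
      | cons c r =>
        have hmf := Bool.eq_false_iff.mpr hm
        rw [scanMix_cons hws hmf]
        have hnp : (AND5 ++ v).isPrefixOf (c :: scanMix ws r) = false := by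
          rw [Bool.eq_false_iff]
          intro hcon
          have h1 : (AND5 ++ v) <+: scanMix ws (c :: r) := by
            rw [scanMix_cons hws hmf]
            exact List.isPrefixOf_iff_prefix.mp hcon
          have h2 := scan_no_new hws (c :: r) (AND5 ++ v) (pat_barfree hv) h1
          exact absurd (mtest_of_pat_prefix hv h2) (by simpa using hm)
        rw [repFn_neg hnp, ih r (by simp), scanMix_cons hws' hmf]


-- ---- the 13 sequential replace passes equal the single scan ----
lemma fold_pass (t : List Char) :
    ∀ (vs ws : List (List Char)), (∀ v ∈ vs, v ∈ pyVerbs) → (∀ w ∈ ws, w ∈ pyVerbs) →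
    vs.foldl (fun u v => repFn (AND5 ++ v) (SEPM ++ v) u) (scanMix ws t) = scanMix (ws ++ vs) t := by
  intro vs
  induction vs with
  | nil => intro ws _ _; simp
  | cons vv vs' ih =>
    intro ws hvs hws
    have h1 : ∀ w ∈ ws ++ [vv], w ∈ pyVerbs := by
      intro w hw
      rcases List.mem_append.mp hw with h | h
      · exact hws w h
      · simp at h; subst h; exact hvs _ (by simp)
    rw [List.foldl_cons, step_pass (hvs vv (by simp)) hws t,
      ih (ws ++ [vv]) (fun x hx => hvs x (by simp [hx])) h1]
    simp

lemma foldRepl_eq (t : List Char) :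
    pyVerbs.foldl (fun u verb =>
      PySem.Chars.replace u ([' ','a','n','d',' '] ++ verb) ([' ','|','|',' '] ++ verb)) t =
    scanMix pyVerbs t := by
  have hcong : pyVerbs.foldl (fun u verb =>
      PySem.Chars.replace u ([' ','a','n','d',' '] ++ verb) ([' ','|','|',' '] ++ verb)) t =
      pyVerbs.foldl (fun u v => repFn (AND5 ++ v) (SEPM ++ v) u) t := by
    apply PySem.List.foldl_congr_mem
    intro u v hv
    show PySem.Chars.replace u ([' ','a','n','d',' '] ++ v) ([' ','|','|',' '] ++ v) = _
    exact replace_eq_repFn _ _ u (by simp)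
  rw [hcong]
  have h0 : t = scanMix [] t := (scanMix_empty t).symm
  conv_lhs => rw [h0]
  rw [fold_pass t pyVerbs [] (fun v hv => hv) (by simp)]
  simp

-- ---- the chunk decomposition behind B's scan ----
def chunksW (rest : List Char) : List (List Char) :=
  if h : mtest (PySem.Chars.lower rest) then [] :: chunksW (rest.drop 5)
  else match rest with
  | [] => [[]]
  | c :: rs => (chunksW rs).modifyHead (c :: ·)
termination_by rest.length
decreasing_by
  · have := mtest_length h
    have hlen : (PySem.Chars.lower rest).length = rest.length := by
      simp [PySem.Chars.lower]
    rw [hlen] at this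
    simp; omega
  · simp

lemma lower_nil : PySem.Chars.lower [] = [] := rfl
lemma lower_cons (c : Char) (l : List Char) :
    PySem.Chars.lower (c :: l) = PySem.Chars.lowerChar c :: PySem.Chars.lower l := rfl
lemma lower_append (a b : List Char) :
    PySem.Chars.lower (a ++ b) = PySem.Chars.lower a ++ PySem.Chars.lower b := by
  simp [PySem.Chars.lower]
lemma lower_drop (n : Nat) (l : List Char) :
    (PySem.Chars.lower l).drop n = PySem.Chars.lower (l.drop n) := by
  simp [PySem.Chars.lower, List.map_drop]
lemma lower_length (l : List Char) : (PySem.Chars.lower l).length = l.length := by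
  simp [PySem.Chars.lower]

lemma chunksW_fire {rest : List Char} (h : mtest (PySem.Chars.lower rest) = true) :
    chunksW rest = [] :: chunksW (rest.drop 5) := by rw [chunksW]; simp [h]
lemma chunksW_nil : chunksW [] = [[]] := by
  rw [chunksW]; simp [mtest, AND5, List.isPrefixOf, lower_nil]
lemma chunksW_cons {c : Char} {rs : List Char} (h : mtest (PySem.Chars.lower (c :: rs)) = false) :
    chunksW (c :: rs) = (chunksW rs).modifyHead (c :: ·) := by
  rw [chunksW]; simp [h]

lemma chunksW_ne {rest : List Char} : chunksW rest ≠ [] := by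
  induction rest using chunksW.induct with
  | case1 rest h ih => rw [chunksW_fire h]; simp
  | case2 h => rw [chunksW_nil]; simp
  | case3 c rs h ih =>
    rw [chunksW_cons (Bool.eq_false_iff.mpr h)]
    cases h2 : chunksW rs with
    | nil => exact absurd h2 ih
    | cons a as => simp

lemma altIsMarker_eq (rest : List Char) : altIsMarker rest = mtest (PySem.Chars.lower rest) := rfl

lemma altScan_eq : ∀ (fuel : Nat) (rest buf : List Char), rest.length ≤ fuel →
    altScan fuel rest buf = (chunksW rest).modifyHead (buf ++ ·) := by
  intro fuel
  induction fuel with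
  | zero =>
    intro rest buf hl
    have : rest = [] := by
      cases rest with
      | nil => rfl
      | cons a b => simp at hl
    subst this
    rw [chunksW_nil]
    simp [altScan]
  | succ n ih =>
    intro rest buf hl
    cases rest with
    | nil => rw [chunksW_nil]; simp [altScan]
    | cons c rs =>
      show (if altIsMarker (c :: rs) then buf :: altScan n ((c :: rs).drop 5) []
            else altScan n rs (buf ++ [c])) = _
      rw [altIsMarker_eq]
      by_cases hm : mtest (PySem.Chars.lower (c :: rs)) = true
      · rw [if_pos hm, chunksW_fire hm]
        rw [ih ((c :: rs).drop 5) [] (by simp at hl ⊢; omega)]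
        cases h2 : chunksW ((c :: rs).drop 5) with
        | nil => exact absurd h2 chunksW_ne
        | cons a as => simp
      · rw [if_neg hm, chunksW_cons (Bool.eq_false_iff.mpr hm)]
        rw [ih rs (buf ++ [c]) (by simp at hl; omega)]
        cases h2 : chunksW rs with
        | nil => exact absurd h2 chunksW_ne
        | cons a as => simp

-- ---- decoration of the split pieces: outer spaces left by " || " insertion ----
def decT : List (List Char) → List (List Char)
  | [] => []
  | [c] => [' ' :: c]
  | c :: cs => ((' ' :: c) ++ [' ']) :: decT cs

def dec : List (List Char) → List (List Char)
  | [] => []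
  | [c] => [c]
  | c :: cs => (c ++ [' ']) :: decT cs

lemma decT_eq : ∀ cs : List (List Char), cs ≠ [] → decT cs = (dec cs).modifyHead (' ' :: ·)
  | [], h => absurd rfl h
  | [c], _ => rfl
  | c :: d :: cs, _ => by
    show ((' ' :: c) ++ [' ']) :: decT (d :: cs) = ((' ' :: (c ++ [' '])) :: decT (d :: cs))
    simp

lemma dec_modifyHead (a : Char) :
    ∀ cs : List (List Char), cs ≠ [] → dec (cs.modifyHead (a :: ·)) = (dec cs).modifyHead (a :: ·)
  | [], h => absurd rfl h
  | [c], _ => rfl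
  | c :: d :: cs, _ => by
    show ((a :: c) ++ [' ']) :: decT (d :: cs) = ((a :: (c ++ [' '])) :: decT (d :: cs))
    simp

lemma scanMix_head (ws : List (List Char)) (hws : ∀ w ∈ ws, w ∈ pyVerbs) (t : List Char) :
    scanMix ws t = [] ∨ (∃ z, scanMix ws t = ' ' :: z) ∨
      (∃ d t' z, t = d :: t' ∧ scanMix ws t = d :: z) := by
  by_cases hr : restr ws t = true
  · right; left
    rw [scanMix_fire_r hr]
    exact ⟨'|' :: '|' :: ' ' :: scanMix ws (t.drop 5), rfl⟩
  · by_cases hm : mtest t = true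
    · right; left
      rw [scanMix_fire_m (Bool.eq_false_iff.mpr hr) hm]
      exact ⟨'a' :: 'n' :: 'd' :: ' ' :: scanMix ws (t.drop 5), rfl⟩
    · cases t with
      | nil => left; exact scanMix_nil
      | cons c r =>
        right; right
        exact ⟨c, r, scanMix ws r, rfl, by
          rw [scanMix_cons hws (Bool.eq_false_iff.mpr hm)]⟩

lemma infix_of_infix_drop {l : List Char} {n : Nat} (h : PP <:+: l.drop n) : PP <:+: l :=
  h.trans (l.drop_suffix n).isInfix

lemma sm2 (s : List Char) (hnpp : ¬ PP <:+: s) :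
    splFn PP (scanMix pyVerbs (PySem.Chars.lower s)) = dec ((chunksW s).map PySem.Chars.lower) := by
  induction hn : s.length using Nat.strong_induction_on generalizing s with
  | _ n ihn =>
  subst hn
  have ih : ∀ s' : List Char, s'.length < s.length → ¬ PP <:+: s' →
      splFn PP (scanMix pyVerbs (PySem.Chars.lower s')) = dec ((chunksW s').map PySem.Chars.lower) :=
    fun s' h hp => ihn s'.length h s' hp rfl
  by_cases hm : mtest (PySem.Chars.lower s) = true
  · have h5 : 5 ≤ s.length := by
      have := mtest_length hm; rwa [lower_length] at this
    have hdl : (s.drop 5).length < s.length := by simp; omega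
    rw [scanMix_fire_r (by rw [restr_pyVerbs]; exact hm), lower_drop, splFn_sepm]
    rw [ih (s.drop 5) hdl (fun hc => hnpp (infix_of_infix_drop hc))]
    rw [chunksW_fire hm]
    simp only [List.map_cons, lower_nil]
    cases h2 : (chunksW (s.drop 5)).map PySem.Chars.lower with
    | nil => simp at h2; exact absurd h2 chunksW_ne
    | cons a as =>
      show [' '] :: (dec (a :: as)).modifyHead (' ' :: ·) = ([] ++ [' ']) :: decT (a :: as)
      rw [decT_eq _ (by simp)]
      simp
  · cases s with
    | nil =>
      rw [lower_nil, scanMix_nil, splFn_nil, chunksW_nil]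
      rfl
    | cons c rs =>
      have hm2 : mtest (PySem.Chars.lowerChar c :: PySem.Chars.lower rs) = false := by
        rw [← lower_cons]; exact Bool.eq_false_iff.mpr hm
      rw [lower_cons, scanMix_cons (fun x hx => hx) hm2]
      have hnp : PP.isPrefixOf
          (PySem.Chars.lowerChar c :: scanMix pyVerbs (PySem.Chars.lower rs)) = false := by
        by_cases hc : c = '|'
        · subst hc
          have hrs : ∀ r0 rs', rs = r0 :: rs' → r0 ≠ '|' := by
            intro r0 rs' hr he
            subst he; subst hr
            exact hnpp ⟨[], rs', by simp [PP]⟩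
          rcases scanMix_head pyVerbs (fun x hx => hx) (PySem.Chars.lower rs)
            with h | ⟨z, hz⟩ | ⟨d, t', z, hd, hz⟩
          · rw [h]; simp [PP, List.isPrefixOf]
          · rw [hz]
            exact not_prefix_second (by decide)
          · rw [hz]
            obtain ⟨r0, rs', hr0⟩ : ∃ r0 rs', rs = r0 :: rs' := by
              cases rs with
              | nil => rw [lower_nil] at hd; simp at hd
              | cons a b => exact ⟨a, b, rfl⟩
            have hdr : d = PySem.Chars.lowerChar r0 := by
              rw [hr0, lower_cons] at hd
              exact (List.cons.inj hd).1.symm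
            subst hdr
            exact not_prefix_second
              (Ne.symm (lowerChar_ne_bar (hrs r0 rs' hr0)))
        · exact not_prefix_head (Ne.symm (lowerChar_ne_bar hc))
      rw [splFn_cons hnp]
      have hnpp' : ¬ PP <:+: rs := by
        intro hc
        exact hnpp (hc.trans (List.suffix_cons c rs).isInfix)
      rw [ih rs (by simp) hnpp']
      rw [chunksW_cons (Bool.eq_false_iff.mpr hm)]
      have hmap : (((chunksW rs).modifyHead (c :: ·)).map PySem.Chars.lower) =
          ((chunksW rs).map PySem.Chars.lower).modifyHead (PySem.Chars.lowerChar c :: ·) := by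
        cases h2 : chunksW rs with
        | nil => exact absurd h2 chunksW_ne
        | cons a as => simp [lower_cons]
      rw [hmap]
      have hne : (chunksW rs).map PySem.Chars.lower ≠ [] := by
        cases h2 : chunksW rs with
        | nil => exact absurd h2 chunksW_ne
        | cons a as => simp
      rw [dec_modifyHead _ _ hne]

-- ---- whitespace / strip lemmas ----
def WS (w : List Char) : Prop := ∀ c ∈ w, PySem.Chars.isspace c = true

lemma lstrip_ws_append {w : List Char} (hw : WS w) (x : List Char) :
    PySem.Chars.lstrip (w ++ x) = PySem.Chars.lstrip x := by
  unfold PySem.Chars.lstrip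
  rw [List.dropWhile_append]
  have h1 : w.dropWhile PySem.Chars.isspace = [] := List.dropWhile_eq_nil_iff.mpr hw
  rw [h1]
  simp

lemma rstrip_append_ws {w : List Char} (hw : WS w) (x : List Char) :
    PySem.Chars.rstrip (x ++ w) = PySem.Chars.rstrip x := by
  unfold PySem.Chars.rstrip
  rw [List.reverse_append, List.dropWhile_append]
  have h1 : w.reverse.dropWhile PySem.Chars.isspace = [] :=
    List.dropWhile_eq_nil_iff.mpr (fun c hc => hw c (by simpa using hc))
  rw [h1]
  simp

lemma strip_ws_left {w : List Char} (hw : WS w) (x : List Char) :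
    PySem.Chars.strip (w ++ x) = PySem.Chars.strip x := by
  unfold PySem.Chars.strip
  rw [lstrip_ws_append hw]

lemma rstrip_decomp (y : List Char) :
    y = PySem.Chars.rstrip y ++ (y.reverse.takeWhile PySem.Chars.isspace).reverse ∧
      WS (y.reverse.takeWhile PySem.Chars.isspace).reverse := by
  constructor
  · unfold PySem.Chars.rstrip
    conv_lhs => rw [← y.reverse_reverse]
    conv_lhs => rw [← List.takeWhile_append_dropWhile (p := PySem.Chars.isspace) (l := y.reverse)]
    rw [List.reverse_append]
  · intro c hc
    simp at hc
    exact List.mem_takeWhile_imp hc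

lemma lstrip_decomp (x : List Char) :
    x = x.takeWhile PySem.Chars.isspace ++ PySem.Chars.lstrip x ∧
      WS (x.takeWhile PySem.Chars.isspace) := by
  constructor
  · unfold PySem.Chars.lstrip
    rw [List.takeWhile_append_dropWhile]
  · intro c hc
    exact List.mem_takeWhile_imp hc

lemma strip_decomp (c : List Char) :
    ∃ w1 w2, c = w1 ++ PySem.Chars.strip c ++ w2 ∧ WS w1 ∧ WS w2 := by
  obtain ⟨h1, hw1⟩ := lstrip_decomp c
  obtain ⟨h2, hw2⟩ := rstrip_decomp (PySem.Chars.lstrip c)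
  refine ⟨c.takeWhile PySem.Chars.isspace,
    ((PySem.Chars.lstrip c).reverse.takeWhile PySem.Chars.isspace).reverse, ?_, hw1, hw2⟩
  rw [List.append_assoc]
  conv_rhs => rw [show PySem.Chars.strip c = PySem.Chars.rstrip (PySem.Chars.lstrip c) from rfl, ← h2]
  exact h1

lemma strip_ws_right {w : List Char} (hw : WS w) (x : List Char) :
    PySem.Chars.strip (x ++ w) = PySem.Chars.strip x := by
  unfold PySem.Chars.strip PySem.Chars.lstrip
  rw [List.dropWhile_append]
  by_cases h : (x.dropWhile PySem.Chars.isspace).isEmpty = true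
  · rw [if_pos h]
    have hwd : w.dropWhile PySem.Chars.isspace = [] := List.dropWhile_eq_nil_iff.mpr hw
    rw [hwd]
    rw [List.isEmpty_iff] at h
    rw [h]
  · rw [if_neg h]
    exact rstrip_append_ws hw _

lemma strip_lower (x : List Char) :
    PySem.Chars.strip (PySem.Chars.lower x) = PySem.Chars.lower (PySem.Chars.strip x) := by
  have hpred : (PySem.Chars.isspace ∘ PySem.Chars.lowerChar) = PySem.Chars.isspace :=
    funext isspace_lowerChar
  unfold PySem.Chars.strip PySem.Chars.lstrip PySem.Chars.rstrip PySem.Chars.lower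
  rw [List.dropWhile_map, hpred, ← List.map_reverse, List.dropWhile_map, hpred, List.map_reverse]

lemma lower_eq_nil {x : List Char} : PySem.Chars.lower x = [] ↔ x = [] := by
  simp [PySem.Chars.lower]

lemma strip_nil_ws {c : List Char} (h : PySem.Chars.strip c = []) : WS c := by
  obtain ⟨w1, w2, hc, hw1, hw2⟩ := strip_decomp c
  rw [h] at hc
  intro a ha
  rw [hc] at ha
  simp at ha
  rcases ha with h1 | h1
  · exact hw1 a h1
  · exact hw2 a h1

lemma strip_head_not_space {c : List Char} (h : PySem.Chars.strip c ≠ []) :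
    ∃ a t, PySem.Chars.strip c = a :: t ∧ PySem.Chars.isspace a = false := by
  cases hs : PySem.Chars.strip c with
  | nil => exact absurd hs h
  | cons a t =>
    refine ⟨a, t, rfl, ?_⟩
    have hy := (rstrip_decomp (PySem.Chars.lstrip c)).1
    have hsc : PySem.Chars.strip c = PySem.Chars.rstrip (PySem.Chars.lstrip c) := rfl
    rw [hsc] at hs
    set W := ((PySem.Chars.lstrip c).reverse.takeWhile PySem.Chars.isspace).reverse with hW
    rw [hs] at hy
    have hz : c.dropWhile PySem.Chars.isspace = a :: (t ++ W) := by
      show PySem.Chars.lstrip c = _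
      rw [hy]; simp
    have hne : c.dropWhile PySem.Chars.isspace ≠ [] := by rw [hz]; simp
    have h3 := List.head_dropWhile_not PySem.Chars.isspace hne
    have h4 : (c.dropWhile PySem.Chars.isspace).head hne = a := by simp [hz]
    rw [h4] at h3
    exact h3

-- ---- stripping removes the decoration ----
lemma stripfilter_decT : ∀ cs : List (List Char),
    ((decT cs).filter (fun p => PySem.Chars.strip p ≠ ([] : List Char))).map PySem.Chars.strip =
    (cs.filter (fun p => PySem.Chars.strip p ≠ ([] : List Char))).map PySem.Chars.strip
  | [] => rfl
  | [c] => by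
    have h1 : PySem.Chars.strip (' ' :: c) = PySem.Chars.strip c :=
      strip_ws_left (w := [' ']) (by intro x hx; simp at hx; subst hx; rfl) c
    simp only [show decT [c] = [' ' :: c] from rfl]
    rw [List.filter_cons, List.filter_cons, h1]
    by_cases hd : PySem.Chars.strip c ≠ ([] : List Char)
    · simp [hd, h1]
    · simp [hd]
  | c :: d :: cs => by
    have h1 : PySem.Chars.strip ((' ' :: c) ++ [' ']) = PySem.Chars.strip c := by
      rw [strip_ws_right (w := [' ']) (by intro x hx; simp at hx; subst hx; rfl)]
      exact strip_ws_left (w := [' ']) (by intro x hx; simp at hx; subst hx; rfl) c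
    have ih := stripfilter_decT (d :: cs)
    simp only [show decT (c :: d :: cs) = ((' ' :: c) ++ [' ']) :: decT (d :: cs) from rfl]
    rw [List.filter_cons, List.filter_cons, h1]
    by_cases hd : PySem.Chars.strip c = ([] : List Char)
    · rw [if_neg (by simp [hd]), if_neg (by simp [hd])]
      exact ih
    · rw [if_pos (by simp [hd]), if_pos (by simp [hd])]
      rw [List.map_cons, List.map_cons, h1, ih]

lemma stripfilter_dec : ∀ cs : List (List Char),
    ((dec cs).filter (fun p => PySem.Chars.strip p ≠ ([] : List Char))).map PySem.Chars.strip =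
    (cs.filter (fun p => PySem.Chars.strip p ≠ ([] : List Char))).map PySem.Chars.strip
  | [] => rfl
  | [c] => rfl
  | c :: d :: cs => by
    have h1 : PySem.Chars.strip (c ++ [' ']) = PySem.Chars.strip c :=
      strip_ws_right (w := [' ']) (by intro x hx; simp at hx; subst hx; rfl) c
    have ih := stripfilter_decT (d :: cs)
    simp only [show dec (c :: d :: cs) = (c ++ [' ']) :: decT (d :: cs) from rfl]
    rw [List.filter_cons, List.filter_cons, h1]
    by_cases hd : PySem.Chars.strip c = ([] : List Char)
    · rw [if_neg (by simp [hd]), if_neg (by simp [hd])]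
      exact ih
    · rw [if_pos (by simp [hd]), if_pos (by simp [hd])]
      rw [List.map_cons, List.map_cons, h1, ih]

-- ---- the temp_parts of A are the lowered stripped kept chunks of B ----
lemma parts_eq (s : List Char) (hnpp : ¬ PP <:+: s) :
    ((PySem.Chars.splitOn (scanMix pyVerbs (PySem.Chars.lower s)) PP).filter
        (fun p => PySem.Chars.strip p ≠ ([] : List Char))).map PySem.Chars.strip =
    ((chunksW s).filter (fun c => PySem.Chars.strip c ≠ ([] : List Char))).map
        (fun c => PySem.Chars.lower (PySem.Chars.strip c)) := by
  rw [splitOn_eq_splFn _ _ (by simp [PP]), sm2 s hnpp, stripfilter_dec]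
  rw [List.filter_map, List.map_map]
  have hpred : (fun p => decide (PySem.Chars.strip p ≠ ([] : List Char))) ∘ PySem.Chars.lower =
      fun c => decide (PySem.Chars.strip c ≠ ([] : List Char)) := by
    funext c
    simp only [Function.comp_apply]
    rw [strip_lower]
    by_cases h : PySem.Chars.strip c = []
    · simp [h, lower_eq_nil]
    · simp [h, lower_eq_nil]
  have hfun : PySem.Chars.strip ∘ PySem.Chars.lower =
      fun c => PySem.Chars.lower (PySem.Chars.strip c) := by
    funext c
    simp only [Function.comp_apply]
    exact strip_lower c
  rw [hpred, hfun]

-- ---- find: exact position characterisation ----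
lemma find_exact {u part : List Char} {k : Nat} (hocc : part <+: u.drop k)
    (hno : ∀ q, q < k → ¬ part <+: u.drop q) : PySem.Chars.find u part = (k : Int) := by
  have hin : PySem.Chars.isIn part u = true :=
    (PySem.Chars.exists_prefix_drop_iff_isIn part u).mp ⟨k, hocc⟩
  have hnn : 0 ≤ PySem.Chars.find u part :=
    (PySem.Chars.find_nonneg_iff u part).mpr ((PySem.Chars.isIn_iff_infix part u).mp hin)
  obtain ⟨h1, h2⟩ := PySem.Chars.find_spec hnn
  have heq : (PySem.Chars.find u part).toNat = k := by
    rcases lt_trichotomy (PySem.Chars.find u part).toNat k with h | h | h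
    · exact absurd h1 (hno _ h)
    · exact h
    · exact absurd hocc (h2 k h)
  omega

-- ---- gap regions: whitespace and case-variant " and " blocks ----
inductive GapS : List Char → Prop
  | nil : GapS []
  | ws {c : Char} {g : List Char} : PySem.Chars.isspace c = true → GapS g → GapS (c :: g)
  | and5 {m g : List Char} : PySem.Chars.lower m = AND5 → GapS g → GapS (m ++ g)

lemma GapS_append {g1 g2 : List Char} (h1 : GapS g1) (h2 : GapS g2) : GapS (g1 ++ g2) := by
  induction h1 with
  | nil => exact h2
  | ws hc _ ih => exact GapS.ws hc ih
  | and5 hm _ ih => rw [List.append_assoc]; exact GapS.and5 hm ih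

lemma GapS_ws : ∀ {w : List Char}, WS w → GapS w
  | [], _ => GapS.nil
  | c :: w, h => GapS.ws (h c (by simp)) (GapS_ws (fun x hx => h x (by simp [hx])))

lemma GapS_of_and5 {m : List Char} (hm : PySem.Chars.lower m = AND5) : GapS m := by
  have := GapS.and5 (g := []) hm GapS.nil
  simpa using this

-- a part that starts with a verb cannot occur strictly inside a gap
lemma gap_no_occ {part : List Char} (hp : ∃ v ∈ pyVerbs, v <+: part) :
    ∀ {g : List Char}, GapS g → ∀ y q, q < g.length →
    ¬ part <+: (PySem.Chars.lower g ++ y).drop q := by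
  obtain ⟨v, hv, hvp⟩ := hp
  obtain ⟨v0, v1, vt, hvshape⟩ : ∃ v0 v1 vt, v = v0 :: v1 :: vt := by
    have h2 := (verbs_ne v hv).2
    cases v with
    | nil => simp at h2
    | cons a w =>
      cases w with
      | nil => simp at h2
      | cons b w' => exact ⟨a, b, w', rfl⟩
  obtain ⟨pz, hpz⟩ := hvp
  have hpart : part = v0 :: v1 :: (vt ++ pz) := by rw [← hpz, hvshape]; simp
  have hv0 : PySem.Chars.isspace v0 = false := (verbs_chars v hv v0 (by simp [hvshape])).1
  have hv0a : v0 ≠ 'a' := by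
    have := (verbs_head v hv).1
    rw [hvshape] at this; simpa using this
  have hv0n : v0 ≠ 'n' := by
    have := (verbs_head v hv).2.1
    rw [hvshape] at this; simpa using this
  have hv0d : v0 = 'd' → v1 = 'e' := by
    intro h
    have := (verbs_head v hv).2.2
    rw [hvshape, h] at this; simpa using this
  intro g hg
  induction hg with
  | nil => intro y q hq; simp at hq
  | @ws c g' hc _ ih =>
    intro y q hq
    cases q with
    | zero =>
      rw [lower_cons]
      intro hcon
      rw [hpart] at hcon
      have h0 := (List.cons_prefix_cons.mp (by simpa using hcon)).1
      have hsp : PySem.Chars.isspace v0 = true := by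
        rw [h0, isspace_lowerChar]; exact hc
      rw [hsp] at hv0
      simp at hv0
    | succ q' =>
      rw [lower_cons]
      intro hcon
      exact ih y q' (by simpa using hq) (by simpa using hcon)
  | @and5 m g' hm _ ih =>
    intro y q hq
    have hml : m.length = 5 := by
      have := lower_length m
      rw [hm] at this
      simpa [AND5] using this.symm
    rw [lower_append, hm]
    have hfull : AND5 ++ (PySem.Chars.lower g' ++ y) =
        ' ' :: 'a' :: 'n' :: 'd' :: ' ' :: (PySem.Chars.lower g' ++ y) := by
      simp [AND5]
    rcases Nat.lt_or_ge q 5 with hq5 | hq5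
    · rw [List.append_assoc, hfull]
      set Z := PySem.Chars.lower g' ++ y with hZ
      interval_cases q
      · intro hcon
        have hd : List.drop 0 (' ' :: 'a' :: 'n' :: 'd' :: ' ' :: Z) =
            ' ' :: 'a' :: 'n' :: 'd' :: ' ' :: Z := rfl
        rw [hd, hpart] at hcon
        have h0 := (List.cons_prefix_cons.mp hcon).1
        rw [h0] at hv0
        exact absurd hv0 (by decide)
      · intro hcon
        have hd : List.drop 1 (' ' :: 'a' :: 'n' :: 'd' :: ' ' :: Z) =
            'a' :: 'n' :: 'd' :: ' ' :: Z := rfl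
        rw [hd, hpart] at hcon
        exact hv0a (List.cons_prefix_cons.mp hcon).1
      · intro hcon
        have hd : List.drop 2 (' ' :: 'a' :: 'n' :: 'd' :: ' ' :: Z) =
            'n' :: 'd' :: ' ' :: Z := rfl
        rw [hd, hpart] at hcon
        exact hv0n (List.cons_prefix_cons.mp hcon).1
      · intro hcon
        have hd : List.drop 3 (' ' :: 'a' :: 'n' :: 'd' :: ' ' :: Z) =
            'd' :: ' ' :: Z := rfl
        rw [hd, hpart] at hcon
        obtain ⟨h0, hrest⟩ := List.cons_prefix_cons.mp hcon
        obtain ⟨h1, -⟩ := List.cons_prefix_cons.mp hrest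
        have he := hv0d h0
        rw [he] at h1
        exact absurd h1 (by decide)
      · intro hcon
        have hd : List.drop 4 (' ' :: 'a' :: 'n' :: 'd' :: ' ' :: Z) =
            ' ' :: Z := rfl
        rw [hd, hpart] at hcon
        have h0 := (List.cons_prefix_cons.mp hcon).1
        rw [h0] at hv0
        exact absurd hv0 (by decide)
    · obtain ⟨q', hq'⟩ : ∃ q', q = 5 + q' := ⟨q - 5, by omega⟩
      have hdrop : (AND5 ++ (PySem.Chars.lower g' ++ y)).drop (5 + q') =
          (PySem.Chars.lower g' ++ y).drop q' := by
        rw [List.drop_append]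
        have hA : (AND5 : List Char).drop (5 + q') = [] :=
          List.drop_eq_nil_of_le (by simp [AND5])
        have hB : 5 + q' - (AND5 : List Char).length = q' := by simp [AND5]
        rw [hA, hB]
        simp
      rw [List.append_assoc, hq', hdrop]
      refine ih y q' ?_
      have h' := hq
      simp [hml] at h'
      omega

-- a non-space-headed part cannot occur strictly inside pure whitespace
lemma ws_no_occ {part : List Char} {a : Char} {pt : List Char}
    (hpart : part = a :: pt) (ha : PySem.Chars.isspace a = false) :
    ∀ {g : List Char}, WS g → ∀ y q, q < g.length →
    ¬ part <+: (PySem.Chars.lower g ++ y).drop q := by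
  intro g
  induction g with
  | nil => intro _ y q hq; simp at hq
  | cons c g' ih =>
    intro hg y q hq
    cases q with
    | zero =>
      rw [lower_cons]
      intro hcon
      rw [hpart] at hcon
      have h0 := (List.cons_prefix_cons.mp (by simpa using hcon)).1
      have hc := hg c (by simp)
      have hsp : PySem.Chars.isspace a = true := by
        rw [h0, isspace_lowerChar]; exact hc
      rw [hsp] at ha
      simp at ha
    | succ q' =>
      rw [lower_cons]
      intro hcon
      exact ih (fun x hx => hg x (by simp [hx])) y q' (by simpa using hq) (by simpa using hcon)

-- ---- chunk decomposition of the sentence ----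
def flatP (ps : List (List Char × List Char)) : List Char :=
  (ps.map (fun p => p.1 ++ p.2)).flatten

lemma chunk_head : ∀ (σ : List Char), (∀ a ∈ σ, PySem.Chars.isspace a = false) →
    ∀ u, σ <+: PySem.Chars.lower u → σ <+: PySem.Chars.lower ((chunksW u).headI) := by
  intro σ
  induction σ with
  | nil => intro _ u _; exact List.nil_prefix
  | cons a σ' ih =>
    intro hσ u hpre
    cases u with
    | nil => rw [lower_nil] at hpre; simp at hpre
    | cons b u' =>
      rw [lower_cons] at hpre
      obtain ⟨hab, hrest⟩ := List.cons_prefix_cons.mp hpre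
      have hbs : PySem.Chars.lowerChar b ≠ ' ' := by
        intro he
        have ha := hσ a (by simp)
        rw [hab, he] at ha
        exact absurd ha (by decide)
      have hm : mtest (PySem.Chars.lower (b :: u')) = false := by
        rw [lower_cons]
        exact mtest_false_head hbs _
      rw [chunksW_cons hm]
      cases h2 : chunksW u' with
      | nil => exact absurd h2 chunksW_ne
      | cons h tl =>
        have ihr := ih (fun x hx => hσ x (by simp [hx])) u' hrest
        rw [h2] at ihr
        simp only [List.modifyHead, List.headI]
        rw [lower_cons]
        exact List.cons_prefix_cons.mpr ⟨hab, by simpa using ihr⟩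

lemma chunks_decomp (s : List Char) :
    ∃ (c₀ : List Char) (ps : List (List Char × List Char)),
    chunksW s = c₀ :: ps.map Prod.snd ∧ s = c₀ ++ flatP ps ∧
    ∀ p ∈ ps, PySem.Chars.lower p.1 = AND5 ∧ ∃ v ∈ pyVerbs, v <+: PySem.Chars.lower p.2 := by
  induction hn : s.length using Nat.strong_induction_on generalizing s with
  | _ n ihn =>
  subst hn
  by_cases hm : mtest (PySem.Chars.lower s) = true
  · have h5 : 5 ≤ s.length := by
      have := mtest_length hm; rwa [lower_length] at this
    obtain ⟨c₀', ps', hch, hs, hprop⟩ :=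
      ihn (s.drop 5).length (by simp; omega) (s.drop 5) rfl
    have hm5 : PySem.Chars.lower (s.take 5) = AND5 := by
      have hpre : AND5 <+: PySem.Chars.lower s := by
        unfold mtest at hm; simp at hm; exact hm.1
      obtain ⟨z, hz⟩ := hpre
      have : PySem.Chars.lower (s.take 5) = (PySem.Chars.lower s).take 5 := by
        simp [PySem.Chars.lower, List.map_take]
      rw [this, ← hz]
      have h5A : (AND5 : List Char).length = 5 := by simp [AND5]
      rw [← h5A, List.take_left]
    have hverb : ∃ v ∈ pyVerbs, v <+: PySem.Chars.lower c₀' := by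
      obtain ⟨-, v, hv, hvp⟩ : AND5 <+: PySem.Chars.lower s ∧
          ∃ v ∈ pyVerbs, v <+: (PySem.Chars.lower s).drop 5 := by
        unfold mtest at hm; simp at hm; exact hm
      refine ⟨v, hv, ?_⟩
      rw [lower_drop] at hvp
      have := chunk_head v (fun a ha => (verbs_chars v hv a ha).1) (s.drop 5) hvp
      rw [hch] at this
      simpa using this
    refine ⟨[], (s.take 5, c₀') :: ps', ?_, ?_, ?_⟩
    · rw [chunksW_fire hm, hch]
      simp
    · show s = [] ++ flatP ((s.take 5, c₀') :: ps')
      have : flatP ((s.take 5, c₀') :: ps') = s.take 5 ++ (c₀' ++ flatP ps') := by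
        simp [flatP]
      rw [this, ← hs]
      simp
    · intro p hp
      rcases List.mem_cons.mp hp with h | h
      · subst h
        exact ⟨hm5, hverb⟩
      · exact hprop p h
  · cases s with
    | nil =>
      refine ⟨[], [], ?_, ?_, ?_⟩
      · rw [chunksW_nil]; simp
      · simp [flatP]
      · simp
    | cons c rs =>
      obtain ⟨c₀', ps', hch, hs, hprop⟩ := ihn rs.length (by simp) rs rfl
      refine ⟨c :: c₀', ps', ?_, ?_, hprop⟩
      · rw [chunksW_cons (Bool.eq_false_iff.mpr hm), hch]
        simp
      · rw [List.cons_append, ← hs]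

-- ---- a chunk that starts (case-insensitively) with a verb has no leading whitespace ----
lemma verb_chunk_decomp {v c : List Char} (hv : v ∈ pyVerbs)
    (hvc : v <+: PySem.Chars.lower c) :
    ∃ w2, c = PySem.Chars.strip c ++ w2 ∧ WS w2 ∧ v <+: PySem.Chars.lower (PySem.Chars.strip c) := by
  obtain ⟨w1, w2, hc, hw1, hw2⟩ := strip_decomp c
  obtain ⟨v0, vt, hv0⟩ : ∃ v0 vt, v = v0 :: vt := by
    cases v with
    | nil => exact absurd rfl (verbs_ne [] hv).1
    | cons a b => exact ⟨a, b, rfl⟩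
  have hw1nil : w1 = [] := by
    cases hw1' : w1 with
    | nil => rfl
    | cons a w1' =>
      exfalso
      rw [hc, hw1', hv0] at hvc
      simp only [List.cons_append, lower_append, lower_cons] at hvc
      have h0 := (List.cons_prefix_cons.mp hvc).1
      have hsp := hw1 a (by simp [hw1'])
      have hns := (verbs_chars v hv v0 (by simp [hv0])).1
      rw [h0, isspace_lowerChar, hsp] at hns
      simp at hns
  rw [hw1nil] at hc
  simp at hc
  set sc := PySem.Chars.strip c with hsc
  have hvlen : v.length ≤ sc.length := by
    by_contra hlt
    push_neg at hlt
    have hw2ne : w2 ≠ [] := by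
      intro he
      rw [he] at hc
      simp at hc
      have hlen := hvc.length_le
      rw [lower_length] at hlen
      rw [hc] at hlen
      omega
    obtain ⟨b, w2', hb⟩ : ∃ b w2', w2 = b :: w2' := by
      cases w2 with
      | nil => exact absurd rfl hw2ne
      | cons x y => exact ⟨x, y, rfl⟩
    have hidx : (PySem.Chars.lower c)[sc.length]? =
        some (PySem.Chars.lowerChar b) := by
      rw [hc, hb, lower_append, lower_cons]
      rw [List.getElem?_append_right (by simp [lower_length])]
      simp [lower_length]
    have hvidx : v[sc.length]? = (PySem.Chars.lower c)[sc.length]? := by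
      obtain ⟨z, hz⟩ := hvc
      rw [← hz]
      rw [List.getElem?_append_left hlt]
    have hvsp : PySem.Chars.isspace (PySem.Chars.lowerChar b) = true := by
      rw [isspace_lowerChar]
      exact hw2 b (by simp [hb])
    obtain ⟨vch, hvch⟩ : ∃ vch, v[sc.length]? = some vch :=
      ⟨v[sc.length]'hlt, by simp⟩
    have hmem : vch ∈ v := List.mem_of_getElem? hvch
    have : vch = PySem.Chars.lowerChar b := by
      rw [hvch, hidx] at hvidx
      simpa using hvidx
    have hvchsp := (verbs_chars v hv vch hmem).1
    rw [this, hvsp] at hvchsp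
    simp at hvchsp
  refine ⟨w2, hc, hw2, ?_⟩
  have hpre2 : PySem.Chars.lower sc <+: PySem.Chars.lower c := by
    conv_rhs => rw [hc]
    rw [lower_append]
    exact List.prefix_append _ _
  exact List.prefix_of_prefix_length_le hvc hpre2 (by rw [lower_length]; exact hvlen)

-- ---- the realignment loop of port A ----
def alignStep (cs : List Char) (st : List (List Char) × Int) (part : List Char) :
    List (List Char) × Int :=
  let idx := PySem.Chars.findFrom (PySem.Chars.lower cs) part st.2
  if idx ≠ -1 then
    (st.1 ++ [PySem.Chars.slice cs (some idx) (some (idx + part.length))], idx + part.length)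
  else (st.1 ++ [part], st.2)

lemma step_core (cs pre G rest' : List Char) (c : List Char) (acc : List (List Char))
    (hs : cs = pre ++ (G ++ (PySem.Chars.strip c ++ rest')))
    (hno : ∀ q, q < G.length →
      ¬ PySem.Chars.lower (PySem.Chars.strip c) <+:
        (PySem.Chars.lower G ++ (PySem.Chars.lower (PySem.Chars.strip c) ++
          PySem.Chars.lower rest')).drop q) :
    alignStep cs (acc, (pre.length : Int)) (PySem.Chars.lower (PySem.Chars.strip c)) =
      (acc ++ [PySem.Chars.strip c],
        ((pre.length + G.length + (PySem.Chars.strip c).length : Nat) : Int)) := by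
  set part := PySem.Chars.lower (PySem.Chars.strip c) with hpart
  have hL : PySem.Chars.lower cs =
      PySem.Chars.lower pre ++ (PySem.Chars.lower G ++ (part ++ PySem.Chars.lower rest')) := by
    rw [hs, lower_append, lower_append, lower_append]
  have hk : pre.length ≤ (PySem.Chars.lower cs).length := by
    rw [lower_length, hs]; simp
  have hdropPre : (PySem.Chars.lower cs).drop pre.length =
      PySem.Chars.lower G ++ (part ++ PySem.Chars.lower rest') := by
    rw [hL]
    have h1 : (PySem.Chars.lower pre).length = pre.length := lower_length pre
    rw [← h1, List.drop_left]
  have hfind : PySem.Chars.find ((PySem.Chars.lower cs).drop pre.length) part = (G.length : Int) := by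
    rw [hdropPre]
    apply find_exact
    · have h1 : (PySem.Chars.lower G).length = G.length := lower_length G
      rw [← h1, List.drop_left]
      exact List.prefix_append _ _
    · exact fun q hq => hno q hq
  have hff : PySem.Chars.findFrom (PySem.Chars.lower cs) part ((pre.length : Nat) : Int) =
      ((pre.length : Nat) : Int) + (G.length : Int) := by
    rw [PySem.Chars.findFrom_natCast _ _ pre.length hk, hfind]
    rw [if_neg (by omega)]
  show (if PySem.Chars.findFrom (PySem.Chars.lower cs) part ((pre.length : Nat) : Int) ≠ -1 then _ else _) = _
  rw [hff, if_pos (by omega)]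
  have hplen : part.length = (PySem.Chars.strip c).length := by
    rw [hpart, lower_length]
  have hidx1 : ((pre.length : Nat) : Int) + (G.length : Int) =
      ((pre.length + G.length : Nat) : Int) := by push_cast; ring
  have hidx2 : ((pre.length : Nat) : Int) + (G.length : Int) + (part.length : Int) =
      ((pre.length + G.length + (PySem.Chars.strip c).length : Nat) : Int) := by
    rw [hplen]; push_cast; ring
  have hslice : PySem.Chars.slice cs
      (some (((pre.length : Nat) : Int) + (G.length : Int)))
      (some (((pre.length : Nat) : Int) + (G.length : Int) + (part.length : Int))) =
      PySem.Chars.strip c := by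
    rw [hidx1, hplen]
    have hcast : ((pre.length + G.length : Nat) : Int) + ((PySem.Chars.strip c).length : Int) =
        ((pre.length + G.length + (PySem.Chars.strip c).length : Nat) : Int) := by push_cast; ring
    rw [hcast]
    rw [PySem.Chars.slice_eq_listSlice, PySem.List.slice_natCast]
    have hdrop : cs.drop (pre.length + G.length) = PySem.Chars.strip c ++ rest' := by
      rw [hs, ← List.append_assoc]
      have h1 : (pre ++ G).length = pre.length + G.length := by simp
      rw [← h1, List.drop_left]
    rw [hdrop]
    have htk : pre.length + G.length + (PySem.Chars.strip c).length -
        (pre.length + G.length) = (PySem.Chars.strip c).length := by omega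
    rw [htk, List.take_left]
  rw [hslice, hidx2]

lemma realign_loop (cs : List Char) :
    ∀ (ps : List (List Char × List Char)) (pre g : List Char) (acc : List (List Char)),
    cs = pre ++ (g ++ flatP ps) → GapS g →
    (∀ p ∈ ps, PySem.Chars.lower p.1 = AND5 ∧ ∃ v ∈ pyVerbs, v <+: PySem.Chars.lower p.2) →
    ∃ st : Int,
      (((ps.map Prod.snd).filter (fun c => PySem.Chars.strip c ≠ ([] : List Char))).map
          (fun c => PySem.Chars.lower (PySem.Chars.strip c))).foldl (alignStep cs)
        (acc, (pre.length : Int)) =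
      (acc ++ ((ps.map Prod.snd).filter (fun c => PySem.Chars.strip c ≠ ([] : List Char))).map
          PySem.Chars.strip, st) := by
  intro ps
  induction ps with
  | nil =>
    intro pre g acc _ _ _
    exact ⟨(pre.length : Int), by simp⟩
  | cons p ps' ih =>
    intro pre g acc hs hg hprop
    obtain ⟨m, c⟩ := p
    obtain ⟨hm, v, hv, hvc⟩ : PySem.Chars.lower m = AND5 ∧
        ∃ v ∈ pyVerbs, v <+: PySem.Chars.lower c := hprop (m, c) (by simp)
    have hprop' : ∀ p ∈ ps', PySem.Chars.lower p.1 = AND5 ∧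
        ∃ v ∈ pyVerbs, v <+: PySem.Chars.lower p.2 := fun p hp => hprop p (by simp [hp])
    have hflat : flatP ((m, c) :: ps') = m ++ (c ++ flatP ps') := by simp [flatP]
    by_cases hstr : PySem.Chars.strip c = []
    · have hfilter : ((((m, c) :: ps').map Prod.snd).filter
          (fun c => PySem.Chars.strip c ≠ ([] : List Char))) =
          ((ps'.map Prod.snd).filter (fun c => PySem.Chars.strip c ≠ ([] : List Char))) := by
        simp [hstr]
      rw [hfilter]
      apply ih pre (g ++ (m ++ c)) acc
      · rw [hs, hflat]
        simp [List.append_assoc]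
      · exact GapS_append hg (GapS.and5 hm (GapS_ws (strip_nil_ws hstr)))
      · exact hprop'
    · obtain ⟨w2, hcdec, hw2, hvstrip⟩ := verb_chunk_decomp hv hvc
      have hfilter : ((((m, c) :: ps').map Prod.snd).filter
          (fun c => PySem.Chars.strip c ≠ ([] : List Char))) =
          c :: ((ps'.map Prod.snd).filter (fun c => PySem.Chars.strip c ≠ ([] : List Char))) := by
        simp [hstr]
      rw [hfilter, List.map_cons, List.map_cons, List.foldl_cons]
      have hs' : cs = pre ++ ((g ++ m) ++ (PySem.Chars.strip c ++ (w2 ++ flatP ps'))) := by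
        rw [hs, hflat]
        conv_lhs => rw [hcdec]
        simp [List.append_assoc]
      have hno := gap_no_occ ⟨v, hv, hvstrip⟩ (GapS_append hg (GapS_of_and5 hm))
        (PySem.Chars.lower (PySem.Chars.strip c) ++ PySem.Chars.lower (w2 ++ flatP ps'))
      have hstep := step_core cs pre (g ++ m) (w2 ++ flatP ps') c acc hs'
        (fun q hq => hno q hq)
      rw [hstep]
      have hlen : ((pre.length + (g ++ m).length + (PySem.Chars.strip c).length : Nat) : Int) =
          (((pre ++ ((g ++ m) ++ PySem.Chars.strip c)).length : Nat) : Int) := by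
        push_cast [List.length_append]
        ring
      rw [hlen]
      obtain ⟨st, hst⟩ := ih (pre ++ ((g ++ m) ++ PySem.Chars.strip c)) w2 (acc ++ [PySem.Chars.strip c])
        (by rw [hs']; simp [List.append_assoc]) (GapS_ws hw2) hprop'
      refine ⟨st, ?_⟩
      rw [hst]
      simp

lemma alignStep_eta (cs : List Char) :
    (fun (st : List (List Char) × Int) (part : List Char) =>
      if PySem.Chars.findFrom (PySem.Chars.lower cs) part st.2 ≠ -1 then
        (st.1 ++ [PySem.Chars.slice cs
            (some (PySem.Chars.findFrom (PySem.Chars.lower cs) part st.2))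
            (some (PySem.Chars.findFrom (PySem.Chars.lower cs) part st.2 + (part.length : Int)))],
          PySem.Chars.findFrom (PySem.Chars.lower cs) part st.2 + (part.length : Int))
      else (st.1 ++ [part], st.2)) = alignStep cs := rfl

-- ===== VERDICT placeholder section continues below =====
theorem split_multi_tasks_spec : Claim_unchanged_split_multi_tasks := by
  intro sentence hdom
  unfold Spec_split_multi_tasks
  intro hD
  have hnpp : ¬ PP <:+: sentence.toList := by
    intro hinf
    apply hD
    unfold D_split_multi_tasks
    rw [PySem.Str.isIn_iff_infix]
    have hpp : ("||" : String).toList = PP := by decide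
    rw [hpp]
    exact hinf
  simp only [split_multi_tasks, split_multi_tasks_alt]
  rw [foldRepl_eq]
  rw [show (['|','|'] : List Char) = PP from rfl]
  rw [parts_eq sentence.toList hnpp]
  rw [altScan_eq sentence.toList.length sentence.toList [] le_rfl]
  rw [alignStep_eta]
  have hmodify : (chunksW sentence.toList).modifyHead (fun x => [] ++ x) =
      chunksW sentence.toList := by
    cases h : chunksW sentence.toList with
    | nil => rfl
    | cons a as => simp
  rw [hmodify]
  obtain ⟨c₀, ps, hch, hsdec, hprop⟩ := chunks_decomp sentence.toList
  rw [hch]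
  by_cases hstr0 : PySem.Chars.strip c₀ = []
  · have hfilter : (c₀ :: ps.map Prod.snd).filter
        (fun c => decide (PySem.Chars.strip c ≠ ([] : List Char))) =
        (ps.map Prod.snd).filter (fun c => decide (PySem.Chars.strip c ≠ ([] : List Char))) := by
      simp [hstr0]
    rw [hfilter]
    obtain ⟨st, hst⟩ := realign_loop sentence.toList ps [] c₀ []
      (by simpa using hsdec) (GapS_ws (strip_nil_ws hstr0)) hprop
    simp only [List.length_nil, Nat.cast_zero] at hst
    rw [hst]
    simp [List.map_map]
  · obtain ⟨w1, w2, hc0, hw1, hw2⟩ := strip_decomp c₀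
    obtain ⟨a0, t0, hsc0, ha0⟩ := strip_head_not_space hstr0
    have hfilter : (c₀ :: ps.map Prod.snd).filter
        (fun c => decide (PySem.Chars.strip c ≠ ([] : List Char))) =
        c₀ :: (ps.map Prod.snd).filter (fun c => decide (PySem.Chars.strip c ≠ ([] : List Char))) := by
      simp [hstr0]
    rw [hfilter, List.map_cons, List.map_cons, List.foldl_cons]
    have hs1 : sentence.toList = [] ++ (w1 ++ (PySem.Chars.strip c₀ ++ (w2 ++ flatP ps))) := by
      rw [hsdec]
      conv_lhs => rw [hc0]
      simp [List.append_assoc]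
    have hno : ∀ q, q < w1.length →
        ¬ PySem.Chars.lower (PySem.Chars.strip c₀) <+:
          (PySem.Chars.lower w1 ++ (PySem.Chars.lower (PySem.Chars.strip c₀) ++
            PySem.Chars.lower (w2 ++ flatP ps))).drop q := by
      intro q hq
      exact ws_no_occ (by rw [hsc0, lower_cons])
        (by rw [isspace_lowerChar]; exact ha0) hw1 _ q hq
    have hstep := step_core sentence.toList [] w1 (w2 ++ flatP ps) c₀ [] hs1 hno
    simp only [List.length_nil, Nat.cast_zero] at hstep
    rw [hstep]
    have hlen : ((0 + w1.length + (PySem.Chars.strip c₀).length : Nat) : Int) =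
        (((w1 ++ PySem.Chars.strip c₀).length : Nat) : Int) := by
      push_cast [List.length_append]
      ring
    rw [hlen]
    obtain ⟨st, hst⟩ := realign_loop sentence.toList ps (w1 ++ PySem.Chars.strip c₀) w2
      ([] ++ [PySem.Chars.strip c₀])
      (by rw [hs1]; simp [List.append_assoc]) (GapS_ws hw2) hprop
    rw [hst]
    simp [List.map_map]

theorem split_multi_tasks_changed : Claim_changed_split_multi_tasks := by
  unfold Claim_changed_split_multi_tasks; decide
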